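-- pv_equiv track=rewrite | github.com/chienhunglee1208/VideoSignalProcessing | hangman.py | getAvailabLetters
-- ===== SOURCE A (Python) =====
-- import string
--
-- def getAvailabLetters(GuessList):
-- 	AtoZ = list(string.ascii_lowercase)
-- 	AZ = ""
-- 	for letter in GuessList:
-- 		if letter in AtoZ:
-- 			AtoZ.remove(letter)
-- 	for letter in AtoZ:
-- 		AZ += letter
-- 	return AZ
-- ===== SOURCE B (Python) =====
-- import string
--
-- def getAvailabLetters(GuessList):
--     guessed = set(GuessList)
--     return "".join(c for c in string.ascii_lowercase if c not in guessed)
-- ===== Notes on version B (the rewrite author's own statement) =====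
-- stated objective: simpler
-- what changed: B drives a single filtering pass over the fixed 26-letter alphabet with a prebuilt set of guesses, instead of A's mutation of a list copy of the alphabet (membership test + list.remove per guess) followed by a concatenation loop.
import Mathlib
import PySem

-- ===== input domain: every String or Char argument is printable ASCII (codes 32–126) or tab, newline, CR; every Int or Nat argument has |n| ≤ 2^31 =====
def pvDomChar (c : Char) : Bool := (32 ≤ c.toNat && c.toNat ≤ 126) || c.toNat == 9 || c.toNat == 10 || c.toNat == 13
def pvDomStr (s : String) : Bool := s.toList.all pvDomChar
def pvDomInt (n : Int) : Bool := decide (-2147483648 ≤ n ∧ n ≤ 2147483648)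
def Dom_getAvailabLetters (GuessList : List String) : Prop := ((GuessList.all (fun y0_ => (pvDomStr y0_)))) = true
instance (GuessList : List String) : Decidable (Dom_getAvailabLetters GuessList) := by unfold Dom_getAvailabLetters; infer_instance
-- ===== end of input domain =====

-- B filters the fixed alphabet by a membership test instead of A's mutate-and-remove
-- on a list copy of the alphabet; return values proved equal on the domain.

-- ===== PORT A =====
-- list(string.ascii_lowercase): a list of 26 single-character strings
def pvAtoZ : List String := "abcdefghijklmnopqrstuvwxyz".toList.map (fun c => String.ofList [c])

-- literal port of A: for each guess, if it is in the remaining list, remove its first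
-- occurrence (Python list.remove on a present element = List.erase, exact here); then
-- concatenate the remaining letters left to right.
def getAvailabLetters (GuessList : List String) : String :=
  let AtoZ := GuessList.foldl
    (fun acc letter => if acc.contains letter then acc.erase letter else acc) pvAtoZ
  AtoZ.foldl (fun az letter => az ++ letter) ""

-- ===== PORT B =====
-- port of B: filter the 26 alphabet characters by non-membership in the guess set
def getAvailabLetters_alt (GuessList : List String) : String :=
  String.ofList ("abcdefghijklmnopqrstuvwxyz".toList.filter
    (fun c => !GuessList.contains (String.ofList [c])))

def Spec_getAvailabLetters (GuessList : List String) (out : String) : Prop := out = getAvailabLetters_alt GuessList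
instance (GuessList : List String) (out : String) : Decidable (Spec_getAvailabLetters GuessList out) := by unfold Spec_getAvailabLetters; infer_instance

-- ===== CLAIM (what is proved, stated in full; the proofs are below) =====
def Claim_equal_getAvailabLetters : Prop := ∀ (GuessList : List String), Dom_getAvailabLetters GuessList → Spec_getAvailabLetters GuessList (getAvailabLetters GuessList)

-- ===== LEMMAS AND PROOFS =====

-- step on a present element is just erase (erase is the identity when absent)
theorem pv_step_eq_erase (acc : List String) (x : String) :
    (if acc.contains x then acc.erase x else acc) = acc.erase x := by
  by_cases h : acc.contains x
  · rw [if_pos h]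
  · rw [if_neg h, List.erase_of_not_mem (by simpa using h)]

-- folding the removal loop over a duplicate-free list filters out all guessed elements
theorem pv_fold_filter (gl : List String) : ∀ (acc : List String), acc.Nodup →
    gl.foldl (fun acc letter => acc.erase letter) acc
      = acc.filter (fun s => !gl.contains s) := by
  induction gl with
  | nil => intro acc _; simp
  | cons g gl ih =>
    intro acc hnd
    simp only [List.foldl_cons]
    rw [ih _ (hnd.erase g), hnd.erase_eq_filter g, List.filter_filter]
    apply List.filter_congr
    intro s _
    by_cases hsg : s = g <;> simp [hsg]

-- concatenating single-character strings left to right rebuilds the string of their chars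
theorem pv_fold_append (l : List Char) : ∀ (s : String),
    (l.map (fun c => String.ofList [c])).foldl (fun az letter => az ++ letter) s
      = s ++ String.ofList l := by
  induction l with
  | nil => intro s; apply String.ext; simp
  | cons c l ih =>
    intro s
    simp only [List.map_cons, List.foldl_cons, ih]
    apply String.ext
    simp

-- ===== VERDICT =====
theorem getAvailabLetters_spec : Claim_equal_getAvailabLetters := by
  intro GuessList _
  unfold Spec_getAvailabLetters getAvailabLetters getAvailabLetters_alt
  simp only [pv_step_eq_erase]
  rw [pv_fold_filter _ _ (by unfold pvAtoZ; decide)]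
  unfold pvAtoZ
  rw [List.filter_map, pv_fold_append]
  simp [Function.comp_def]
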